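-- pv_equiv track=rewrite | github.com/daniel-reich/ubiquitous-fiesta | f6X7pa38iQyoytJgr_18.py | increasing_word_weights
-- ===== SOURCE A (Python) =====
-- def increasing_word_weights(sentence):
--   wds = sentence.split()
--   weights = []
--   for w in wds:
--     weight = 0
--     for ch in w:
--       if ch.isalpha():
--         weight += ord(ch)
--     weights.append(weight)
--   for i in range(len(weights)-1):
--     if weights[i] >= weights[i+1]:
--       return False
--   return True
-- ===== SOURCE B (Python) =====
-- def increasing_word_weights(sentence):
--   weights = [sum(ord(ch) for ch in w if ch.isalpha()) for w in sentence.split()]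
--   return weights == sorted(weights) and len(set(weights)) == len(weights)
-- ===== Notes on version B (the rewrite author's own statement) =====
-- stated objective: alternative
-- what changed: Replaces A's index-based adjacent-pair scan with a sort/set characterization of strict increase: the weights list must equal its sorted copy (non-decreasing) and have no duplicates (len(set)==len), so no pairwise comparison loop exists at all.
import Mathlib
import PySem

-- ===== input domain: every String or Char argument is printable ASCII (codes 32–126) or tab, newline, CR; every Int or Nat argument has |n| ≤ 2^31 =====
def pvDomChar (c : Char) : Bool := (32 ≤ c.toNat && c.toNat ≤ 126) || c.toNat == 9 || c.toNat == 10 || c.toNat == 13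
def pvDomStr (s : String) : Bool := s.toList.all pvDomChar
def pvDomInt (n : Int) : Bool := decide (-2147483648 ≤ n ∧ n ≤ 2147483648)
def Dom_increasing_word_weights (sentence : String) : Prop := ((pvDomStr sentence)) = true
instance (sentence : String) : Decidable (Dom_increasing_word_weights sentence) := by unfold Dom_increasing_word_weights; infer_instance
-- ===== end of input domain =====

-- B replaces A's adjacent-pair index scan with a sort/set characterization of strict increase
-- (weights == sorted(weights) and len(set(weights)) == len(weights)); alternative, same result.

-- ===== PORT A =====
-- inner loop: weight = 0; for ch in w: if ch.isalpha(): weight += ord(ch)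
def pvWeightA (w : String) : Int :=
  w.toList.foldl (fun weight ch => if PySem.Chars.isalpha ch then weight + (ch.toNat : Int) else weight) 0

-- for i in range(len(weights)-1): if weights[i] >= weights[i+1]: return False  (indices are always in range, so getD is exact)
def pvLoopA (weights : List Int) (i : Nat) : Bool :=
  if i < weights.length - 1 then
    if weights.getD i 0 ≥ weights.getD (i+1) 0 then false else pvLoopA weights (i+1)
  else true
termination_by weights.length - 1 - i

def increasing_word_weights (sentence : String) : Bool :=
  let wds := PySem.Str.split₀ sentence
  let weights := wds.foldl (fun acc w => acc ++ [pvWeightA w]) []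
  pvLoopA weights 0

-- ===== PORT B =====
-- weight = sum(ord(ch) for ch in w if ch.isalpha())
def pvWeightB (w : String) : Int :=
  ((w.toList.filter PySem.Chars.isalpha).map (fun ch => (ch.toNat : Int))).foldl (· + ·) 0

-- weights == sorted(weights) and len(set(weights)) == len(weights)
def increasing_word_weights_alt (sentence : String) : Bool :=
  let weights := (PySem.Str.split₀ sentence).map pvWeightB
  decide (weights = PySem.List.sorted weights (fun x => x) false) &&
    (PySem.Set.len (PySem.Set.ofList weights) == (weights.length : Int))

-- ===== PRECONDITION & SPEC =====
def Spec_increasing_word_weights (sentence : String) (out : Bool) : Prop := out = increasing_word_weights_alt sentence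
instance (sentence : String) (out : Bool) : Decidable (Spec_increasing_word_weights sentence out) := by unfold Spec_increasing_word_weights; infer_instance

-- ===== CLAIM =====
def Claim_equal_increasing_word_weights : Prop := ∀ (sentence : String), Dom_increasing_word_weights sentence → Spec_increasing_word_weights sentence (increasing_word_weights sentence)

-- ===== LEMMAS AND PROOFS =====

theorem pvWeightA_eq (w : String) : pvWeightA w = pvWeightB w := by
  unfold pvWeightA pvWeightB
  generalize w.toList = cs
  suffices h : ∀ (cs : List Char) (a : Int),
      cs.foldl (fun weight ch => if PySem.Chars.isalpha ch then weight + (ch.toNat : Int) else weight) a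
        = ((cs.filter PySem.Chars.isalpha).map (fun ch => (ch.toNat : Int))).foldl (· + ·) a from h cs 0
  intro cs
  induction cs with
  | nil => intro a; rfl
  | cons c t ih =>
    intro a
    by_cases hc : PySem.Chars.isalpha c = true <;> simp [List.foldl, hc, ih]

theorem pvBuild_eq (ws : List String) (acc : List Int) :
    ws.foldl (fun acc w => acc ++ [pvWeightA w]) acc = acc ++ ws.map pvWeightA := by
  induction ws generalizing acc with
  | nil => simp
  | cons w t ih => simp [List.foldl, ih]

-- A's scan returns true iff the list is strictly increasing pairwise
theorem pvLoopA_iff (weights : List Int) (i : Nat) :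
    pvLoopA weights i = true ↔ (weights.drop i).Pairwise (· < ·) := by
  induction i using pvLoopA.induct weights with
  | case1 i h hge =>
    rw [pvLoopA]
    have hi : i < weights.length := by omega
    have hi1 : i + 1 < weights.length := by omega
    have hle : weights[i+1] ≤ weights[i] := by
      simpa [List.getD_eq_getElem?_getD, List.getElem?_eq_getElem hi,
        List.getElem?_eq_getElem hi1] using hge
    rw [List.drop_eq_getElem_cons hi, List.drop_eq_getElem_cons hi1]
    simp only [h, if_true, hge, List.pairwise_cons]
    constructor
    · intro hfalse; cases hfalse
    · rintro ⟨hall, -⟩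
      have := hall weights[i+1] (List.mem_cons_self)
      omega
  | case2 i h hge ih =>
    rw [pvLoopA]
    have hi : i < weights.length := by omega
    have hi1 : i + 1 < weights.length := by omega
    have hlt : weights[i] < weights[i+1] := by
      simp only [List.getD_eq_getElem?_getD, List.getElem?_eq_getElem hi,
        List.getElem?_eq_getElem hi1, Option.getD_some, ge_iff_le, not_le] at hge
      exact hge
    rw [List.drop_eq_getElem_cons hi]
    simp only [h, if_true, if_neg hge, List.pairwise_cons]
    rw [ih]
    constructor
    · intro hp
      refine ⟨?_, hp⟩
      intro a ha
      rw [List.drop_eq_getElem_cons hi1] at ha hp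
      rcases List.mem_cons.mp ha with rfl | hmem
      · exact hlt
      · exact lt_trans hlt ((List.pairwise_cons.mp hp).1 a hmem)
    · exact fun ⟨_, hp⟩ => hp
  | case3 i h =>
    rw [pvLoopA]
    simp only [h, if_false]
    have hlen : (weights.drop i).length ≤ 1 := by simp; omega
    match hd : weights.drop i with
    | [] => simp
    | [_] => simp
    | a :: b :: t => rw [hd] at hlen; simp at hlen

-- ofList builds a sublist of its input
theorem pvOfList_sublist (xs : List Int) :
    ∀ acc : List Int, ∃ ys : List Int, xs.foldl PySem.Set.add acc = acc ++ ys ∧ ys.Sublist xs := by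
  induction xs with
  | nil => intro acc; exact ⟨[], by simp⟩
  | cons x t ih =>
    intro acc
    simp only [List.foldl]
    by_cases hc : x ∈ acc
    · obtain ⟨ys, hys, hsub⟩ := ih acc
      refine ⟨ys, ?_, hsub.cons x⟩
      have : PySem.Set.add acc x = acc := by simp [PySem.Set.add, PySem.Set.contains, hc]
      rw [this]; exact hys
    · obtain ⟨ys, hys, hsub⟩ := ih (acc ++ [x])
      refine ⟨x :: ys, ?_, hsub.cons₂ x⟩
      have : PySem.Set.add acc x = acc ++ [x] := by simp [PySem.Set.add, PySem.Set.contains, hc]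
      rw [this, hys]; simp

theorem pvOfList_nodup_eq (xs : List Int) (hnd : xs.Nodup) :
    ∀ acc : List Int, (∀ x ∈ xs, x ∉ acc) →
      xs.foldl PySem.Set.add acc = acc ++ xs := by
  induction xs with
  | nil => intro acc _; simp
  | cons x t ih =>
    intro acc hacc
    simp only [List.foldl]
    have hadd : PySem.Set.add acc x = acc ++ [x] := by
      simp [PySem.Set.add, PySem.Set.contains, hacc x (by simp)]
    rw [hadd, ih (List.Nodup.of_cons hnd) (acc ++ [x]) ?_]
    · simp
    · intro y hy
      have hyx : y ≠ x := by
        intro h; subst h; exact (List.nodup_cons.mp hnd).1 hy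
      have hna := hacc y (List.mem_cons_of_mem _ hy)
      simp [hna, hyx]

-- len(set(xs)) == len(xs) iff xs has no duplicates
theorem pvSetLen_iff (xs : List Int) :
    (PySem.Set.len (PySem.Set.ofList xs) = (xs.length : Int)) ↔ xs.Nodup := by
  constructor
  · intro h
    obtain ⟨ys, hys, hsub⟩ := pvOfList_sublist xs []
    have hof : PySem.Set.ofList xs = ys := by
      simpa [PySem.Set.ofList_eq_foldl] using hys
    have hlen : ys.length = xs.length := by
      rw [PySem.Set.len, hof] at h
      exact_mod_cast h
    have heq : ys = xs := hsub.eq_of_length hlen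
    rw [← heq, ← hof]
    exact PySem.Set.nodup_ofList xs
  · intro hnd
    have := pvOfList_nodup_eq xs hnd [] (by intro x _ h; cases h)
    rw [PySem.Set.len, PySem.Set.ofList_eq_foldl, this]
    simp

-- xs == sorted(xs) iff xs is pairwise non-decreasing
theorem pvSortedEq_iff (xs : List Int) :
    (xs = PySem.List.sorted xs (fun x => x) false) ↔ xs.Pairwise (· ≤ ·) := by
  constructor
  · intro h
    have := PySem.List.sorted_pairwise xs (fun x => x)
    rw [← h] at this
    exact this
  · intro h
    exact (PySem.List.sorted_eq_self_of_pairwise xs (fun x => x) h).symm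

theorem pvStrict_iff (xs : List Int) :
    (xs.Pairwise (· ≤ ·) ∧ xs.Nodup) ↔ xs.Pairwise (· < ·) := by
  constructor
  · rintro ⟨hle, hnd⟩
    have := List.Pairwise.and hle hnd
    exact this.imp (fun {a b} ⟨h1, h2⟩ => lt_of_le_of_ne h1 h2)
  · intro h
    exact ⟨h.imp (fun {a b} h => le_of_lt h), h.imp (fun {a b} h => ne_of_lt h)⟩

-- ===== VERDICT =====
theorem increasing_word_weights_spec : Claim_equal_increasing_word_weights := by
  intro sentence _
  unfold Spec_increasing_word_weights increasing_word_weights increasing_word_weights_alt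
  simp only [pvBuild_eq, List.nil_append]
  have hmap : (PySem.Str.split₀ sentence).map pvWeightA
      = (PySem.Str.split₀ sentence).map pvWeightB :=
    List.map_congr_left fun w _ => pvWeightA_eq w
  rw [hmap]
  set ws := (PySem.Str.split₀ sentence).map pvWeightB with hws
  rw [Bool.eq_iff_iff]
  rw [Bool.and_eq_true, decide_eq_true_iff, beq_iff_eq]
  rw [pvLoopA_iff, List.drop_zero, ← pvStrict_iff, ← pvSortedEq_iff, ← pvSetLen_iff]
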